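-- pv_equiv track=rewrite | github.com/CroDoc/feedback-prize | code/data.py | get_word_spans
-- ===== SOURCE A (Python) =====
-- def get_word_spans(text):
--     word_start = True
--
--     starts, ends = [], []
--     end = -1
--
--     for i in range(len(text)):
--
--         if text[i].isspace():
--             if end != -1:
--                 ends.append(end)
--                 end = -1
--
--             word_start=True
--             continue
--
--         if word_start==True:
--             starts.append(i)
--             word_start=False
--
--         end = i + 1
--
--     if len(starts) > len(ends):
--         ends.append(end)
--
--     return list(zip(starts, ends))
-- ===== SOURCE B (Python) =====
-- def get_word_spans(text):
--     n = len(text)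
--     sp = [c.isspace() for c in text]
--     starts = [i for i in range(n) if not sp[i] and (i == 0 or sp[i - 1])]
--     ends = [i + 1 for i in range(n) if not sp[i] and (i == n - 1 or sp[i + 1])]
--     return list(zip(starts, ends))
-- ===== Notes on version B (the rewrite author's own statement) =====
-- stated objective: idiomatic
-- what changed: Replaces the mutable word_start/end state machine plus post-loop fixup by a whitespace mask and two stateless boundary comprehensions (a word starts where a non-space follows a space/start, ends where a non-space precedes a space/end).
import Mathlib
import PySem

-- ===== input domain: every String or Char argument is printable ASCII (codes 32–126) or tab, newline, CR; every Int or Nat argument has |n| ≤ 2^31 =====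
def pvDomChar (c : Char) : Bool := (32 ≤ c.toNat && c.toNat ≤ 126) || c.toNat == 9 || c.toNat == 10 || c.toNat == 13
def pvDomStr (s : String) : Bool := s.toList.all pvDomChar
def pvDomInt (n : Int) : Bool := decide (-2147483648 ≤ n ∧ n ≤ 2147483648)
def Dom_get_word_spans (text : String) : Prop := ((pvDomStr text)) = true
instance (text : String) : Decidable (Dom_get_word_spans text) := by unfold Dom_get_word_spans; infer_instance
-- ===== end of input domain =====

-- B replaces A's mutable word_start/end state machine (with its post-loop fixup) by a
-- whitespace mask and two stateless boundary comprehensions; same O(n) cost, more idiomatic.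

-- ===== PORT A =====
-- loop state: (word_start, starts, ends, end)
def pvStepA (st : Bool × List Int × List Int × Int) (p : Int × Char) :
    Bool × List Int × List Int × Int :=
  if PySem.Chars.isspace p.2 then
    (true, st.2.1,
      if st.2.2.2 ≠ -1 then st.2.2.1 ++ [st.2.2.2] else st.2.2.1,
      if st.2.2.2 ≠ -1 then -1 else st.2.2.2)
  else
    (false, if st.1 then st.2.1 ++ [p.1] else st.2.1, st.2.2.1, p.1 + 1)

def get_word_spans (text : String) : List (Int × Int) :=
  let r := (PySem.List.enumerate text.toList 0).foldl pvStepA (true, [], [], -1)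
  r.2.1.zip (if r.2.1.length > r.2.2.1.length then r.2.2.1 ++ [r.2.2.2] else r.2.2.1)

-- ===== PORT B =====
-- Source B's locals sp/starts/ends are inlined; sp.getD is the list indexing (always in range)
def get_word_spans_alt (text : String) : List (Int × Int) :=
  (((List.range text.toList.length).filter
      (fun i => !((text.toList.map PySem.Chars.isspace).getD i false) &&
        (i == 0 || (text.toList.map PySem.Chars.isspace).getD (i - 1) false))).map
      (fun (i : Nat) => (i : Int))).zip
  (((List.range text.toList.length).filter
      (fun i => !((text.toList.map PySem.Chars.isspace).getD i false) &&
        (i == text.toList.length - 1 || (text.toList.map PySem.Chars.isspace).getD (i + 1) false))).map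
      (fun (i : Nat) => (i : Int) + 1))

-- ===== PRECONDITION & SPEC =====
def Spec_get_word_spans (text : String) (out : List (Int × Int)) : Prop := out = get_word_spans_alt text
instance (text : String) (out : List (Int × Int)) : Decidable (Spec_get_word_spans text out) := by unfold Spec_get_word_spans; infer_instance

-- ===== CLAIM (what is proved, stated in full; the proofs are below) =====
def Claim_equal_get_word_spans : Prop := ∀ (text : String), Dom_get_word_spans text → Spec_get_word_spans text (get_word_spans text)

-- ===== LEMMAS AND PROOFS =====

-- run starts: position i, pend = previous char was non-space
def specStarts (i : Int) (pend : Bool) : List Char → List Int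
  | [] => []
  | c :: cs =>
    if PySem.Chars.isspace c then specStarts (i + 1) false cs
    else (if pend then [] else [i]) ++ specStarts (i + 1) true cs

-- run ends, state-machine style (pend = a run is open and would end at i)
def specEnds (i : Int) (pend : Bool) : List Char → List Int
  | [] => if pend then [i] else []
  | c :: cs =>
    if PySem.Chars.isspace c then (if pend then [i] else []) ++ specEnds (i + 1) false cs
    else specEnds (i + 1) true cs

-- "next char is space, or end of string"
def headSp : List Char → Bool
  | [] => true
  | c :: _ => PySem.Chars.isspace c

-- run ends, lookahead style
def specEndsLA (i : Int) : List Char → List Int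
  | [] => []
  | c :: cs =>
    (if !PySem.Chars.isspace c && headSp cs then [i + 1] else []) ++ specEndsLA (i + 1) cs

theorem loopA (cs : List Char) : ∀ (i : Int) (S E : List Int) (pend : Bool), 0 ≤ i →
    S.length = E.length + (if pend then 1 else 0) →
    (let r := (PySem.List.enumerate cs i).foldl pvStepA (!pend, S, E, if pend then i else -1)
     r.2.1.zip (if r.2.1.length > r.2.2.1.length then r.2.2.1 ++ [r.2.2.2] else r.2.2.1))
    = (S ++ specStarts i pend cs).zip (E ++ specEnds i pend cs) := by
  induction cs with
  | nil =>
    intro i S E pend hi hlen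
    cases pend with
    | false =>
      simp only [if_neg (by simp : ¬ (false = true))] at hlen ⊢
      simp [PySem.List.enumerate, specStarts, specEnds, hlen]
    | true =>
      simp only [] at hlen ⊢
      simp [PySem.List.enumerate, specStarts, specEnds, hlen]
  | cons c cs ih =>
    intro i S E pend hi hlen
    rw [PySem.List.enumerate_cons, List.foldl_cons]
    by_cases hsp : PySem.Chars.isspace c = true
    · cases pend with
      | false =>
        have hstep : pvStepA (!false, S, E, if false then i else -1) (i, c)
            = (!false, S, E, if false then (i+1) else -1) := by
          simp [pvStepA, hsp]
        rw [hstep]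
        have := ih (i + 1) S E false (by omega) (by simpa using hlen)
        simp only [specStarts, specEnds, hsp]
        simpa using this
      | true =>
        have hstep : pvStepA (!true, S, E, if true then i else -1) (i, c)
            = (!false, S, E ++ [i], if false then (i+1) else -1) := by
          simp [pvStepA, hsp]; omega
        rw [hstep]
        have := ih (i + 1) S (E ++ [i]) false (by omega)
          (by simp at hlen ⊢; omega)
        simp only [specStarts, specEnds, hsp]
        simpa [List.append_assoc] using this
    · have hspf : PySem.Chars.isspace c = false := by simpa using hsp
      cases pend with
      | false =>
        have hstep : pvStepA (!false, S, E, if false then i else -1) (i, c)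
            = (!true, S ++ [i], E, if true then (i+1) else -1) := by
          simp [pvStepA, hspf]
        rw [hstep]
        have := ih (i + 1) (S ++ [i]) E true (by omega)
          (by simp at hlen ⊢; omega)
        simp only [specStarts, specEnds, hspf]
        simpa [List.append_assoc] using this
      | true =>
        have hstep : pvStepA (!true, S, E, if true then i else -1) (i, c)
            = (!true, S, E, if true then (i+1) else -1) := by
          simp [pvStepA, hspf]
        rw [hstep]
        have := ih (i + 1) S E true (by omega) (by simpa using hlen)
        simp only [specStarts, specEnds, hspf]
        simpa using this

theorem A_eq_spec (text : String) :
    get_word_spans text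
      = (specStarts 0 false text.toList).zip (specEnds 0 false text.toList) := by
  have := loopA text.toList 0 [] [] false (le_refl 0) (by simp)
  simpa [get_word_spans] using this

theorem SB (cs : List Char) : ∀ (i : Int) (pend : Bool),
    ((List.range cs.length).filter
        (fun j => !((cs.map PySem.Chars.isspace).getD j false) &&
          ((decide (j = 0) && !pend) ||
           (!decide (j = 0) && (cs.map PySem.Chars.isspace).getD (j - 1) false)))).map
      (fun (j : Nat) => i + (j : Int))
    = specStarts i pend cs := by
  induction cs with
  | nil => intro i pend; simp [specStarts]
  | cons c cs ih =>
    intro i pend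
    rw [List.length_cons, List.range_succ_eq_map, List.filter_cons, List.filter_map]
    rw [List.filter_congr (fun j _ => by
      show ((fun j => !(((c :: cs).map PySem.Chars.isspace).getD j false) &&
          ((decide (j = 0) && !pend) ||
           (!decide (j = 0) && (((c :: cs).map PySem.Chars.isspace).getD (j - 1) false)))) ∘ Nat.succ) j
        = (!((cs.map PySem.Chars.isspace).getD j false) &&
          ((decide (j = 0) && !(!PySem.Chars.isspace c)) ||
           (!decide (j = 0) && (cs.map PySem.Chars.isspace).getD (j - 1) false)))
      cases j <;> simp [List.getD])]
    have hmap : (List.map Nat.succ (List.filter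
          (fun j => !((cs.map PySem.Chars.isspace).getD j false) &&
            ((decide (j = 0) && !(!PySem.Chars.isspace c)) ||
             (!decide (j = 0) && (cs.map PySem.Chars.isspace).getD (j - 1) false)))
          (List.range cs.length))).map (fun j : Nat => i + (j : Int))
        = specStarts (i + 1) (!PySem.Chars.isspace c) cs := by
      rw [List.map_map]
      rw [show ((fun j : Nat => i + (j : Int)) ∘ Nat.succ) = (fun j : Nat => (i + 1) + (j : Int)) from
        by funext j; simp [Nat.succ_eq_add_one]; ring]
      exact ih (i + 1) (!PySem.Chars.isspace c)
    by_cases hsp : PySem.Chars.isspace c = true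
    · have h0 : (!(((c :: cs).map PySem.Chars.isspace).getD 0 false) &&
          ((decide ((0:Nat) = 0) && !pend) ||
           (!decide ((0:Nat) = 0) && (((c :: cs).map PySem.Chars.isspace).getD (0 - 1) false)))) = false := by
        simp [List.getD, hsp]
      rw [h0]
      simp only [Bool.false_eq_true, if_false, hmap]
      simp [specStarts, hsp]
    · have hspf : PySem.Chars.isspace c = false := by simpa using hsp
      have h0 : (!(((c :: cs).map PySem.Chars.isspace).getD 0 false) &&
          ((decide ((0:Nat) = 0) && !pend) ||
           (!decide ((0:Nat) = 0) && (((c :: cs).map PySem.Chars.isspace).getD (0 - 1) false)))) = !pend := by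
        simp [List.getD, hspf]
      rw [h0]
      cases pend with
      | false =>
        simp only [Bool.not_false, if_true, List.map_cons, hmap]
        simp [specStarts, hspf]
      | true =>
        simp only [Bool.not_true, Bool.false_eq_true, if_false, hmap]
        simp [specStarts, hspf]

theorem EB (cs : List Char) : ∀ (i : Int),
    ((List.range cs.length).filter
        (fun j => !((cs.map PySem.Chars.isspace).getD j false) &&
          (decide (j = cs.length - 1) || (cs.map PySem.Chars.isspace).getD (j + 1) false))).map
      (fun (j : Nat) => i + (j : Int) + 1)
    = specEndsLA i cs := by
  induction cs with
  | nil => intro i; simp [specEndsLA]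
  | cons c cs ih =>
    intro i
    rw [List.length_cons, List.range_succ_eq_map, List.filter_cons, List.filter_map]
    rw [List.filter_congr (fun j hj => by
      have hjlt : j < cs.length := List.mem_range.mp hj
      show ((fun j => !(((c :: cs).map PySem.Chars.isspace).getD j false) &&
          (decide (j = (c :: cs).length - 1) ||
           (((c :: cs).map PySem.Chars.isspace).getD (j + 1) false))) ∘ Nat.succ) j
        = (!((cs.map PySem.Chars.isspace).getD j false) &&
          (decide (j = cs.length - 1) || (cs.map PySem.Chars.isspace).getD (j + 1) false))
      have hd : decide (j + 1 = (c :: cs).length - 1) = decide (j = cs.length - 1) := by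
        simp only [List.length_cons, Nat.add_sub_cancel]
        by_cases h : j = cs.length - 1
        · subst h; simp; omega
        · have h2 : ¬ (j + 1 = cs.length) := by omega
          simp [h, h2]
      simp only [Function.comp_apply, Nat.succ_eq_add_one, List.map_cons, List.getD_cons_succ, hd])]
    have hmap : (List.map Nat.succ (List.filter
          (fun j => !((cs.map PySem.Chars.isspace).getD j false) &&
            (decide (j = cs.length - 1) || (cs.map PySem.Chars.isspace).getD (j + 1) false))
          (List.range cs.length))).map (fun (j : Nat) => i + (j : Int) + 1)
        = specEndsLA (i + 1) cs := by
      rw [List.map_map]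
      rw [show ((fun (j : Nat) => i + (j : Int) + 1) ∘ Nat.succ)
            = (fun (j : Nat) => (i + 1) + (j : Int) + 1) from
        by funext j; simp [Nat.succ_eq_add_one]; ring]
      exact ih (i + 1)
    have h0 : (!(((c :: cs).map PySem.Chars.isspace).getD 0 false) &&
        (decide ((0:Nat) = cs.length + 1 - 1) ||
         (((c :: cs).map PySem.Chars.isspace).getD (0 + 1) false)))
        = (!PySem.Chars.isspace c && headSp cs) := by
      cases cs <;> simp [List.getD, headSp]
    rw [h0]
    cases hs : (!PySem.Chars.isspace c && headSp cs) with
    | false => simp only [Bool.false_eq_true, if_false, hmap]; simp [specEndsLA, hs]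
    | true => simp only [if_true, List.map_cons, hmap]; simp [specEndsLA, hs]


theorem ends_pend_eq_LA (cs : List Char) : ∀ (i : Int) (pend : Bool),
    specEnds i pend cs = (if pend && headSp cs then [i] else []) ++ specEndsLA i cs := by
  induction cs with
  | nil => intro i pend; cases pend <;> simp [specEnds, specEndsLA, headSp]
  | cons c cs ih =>
    intro i pend
    by_cases hsp : PySem.Chars.isspace c = true
    · simp only [specEnds, specEndsLA, headSp, hsp]
      rw [ih (i + 1) false]
      cases pend <;> simp [headSp]
    · have hspf : PySem.Chars.isspace c = false := by simpa using hsp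
      simp only [specEnds, specEndsLA, headSp, hspf]
      rw [ih (i + 1) true]
      cases cs <;> simp [headSp]

theorem B_eq_spec (text : String) :
    get_word_spans_alt text
      = (specStarts 0 false text.toList).zip (specEnds 0 false text.toList) := by
  have hs : ((List.range text.toList.length).filter
      (fun i => !((text.toList.map PySem.Chars.isspace).getD i false) &&
        (i == 0 || (text.toList.map PySem.Chars.isspace).getD (i - 1) false))).map
      (fun (i : Nat) => (i : Int)) = specStarts 0 false text.toList := by
    rw [List.filter_congr (fun j _ => by
      show (!((text.toList.map PySem.Chars.isspace).getD j false) &&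
        (j == 0 || (text.toList.map PySem.Chars.isspace).getD (j - 1) false))
        = (!((text.toList.map PySem.Chars.isspace).getD j false) &&
          ((decide (j = 0) && !false) ||
           (!decide (j = 0) && (text.toList.map PySem.Chars.isspace).getD (j - 1) false)))
      cases j <;> simp)]
    rw [show (fun (i : Nat) => (i : Int)) = (fun (j : Nat) => (0 : Int) + (j : Int)) from
      funext fun j => by simp]
    exact SB text.toList 0 false
  have he : ((List.range text.toList.length).filter
      (fun i => !((text.toList.map PySem.Chars.isspace).getD i false) &&
        (i == text.toList.length - 1 ||
         (text.toList.map PySem.Chars.isspace).getD (i + 1) false))).map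
      (fun (i : Nat) => (i : Int) + 1) = specEnds 0 false text.toList := by
    rw [ends_pend_eq_LA text.toList 0 false]
    simp only [Bool.false_and, Bool.false_eq_true, if_false, List.nil_append]
    rw [List.filter_congr (fun j _ => by
      show (!((text.toList.map PySem.Chars.isspace).getD j false) &&
        (j == text.toList.length - 1 ||
         (text.toList.map PySem.Chars.isspace).getD (j + 1) false))
        = (!((text.toList.map PySem.Chars.isspace).getD j false) &&
          (decide (j = text.toList.length - 1) ||
           (text.toList.map PySem.Chars.isspace).getD (j + 1) false))
      rw [Bool.beq_eq_decide_eq j (text.toList.length - 1)])]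
    rw [show (fun (i : Nat) => (i : Int) + 1) = (fun (j : Nat) => (0 : Int) + (j : Int) + 1) from
      funext fun j => by simp]
    exact EB text.toList 0
  unfold get_word_spans_alt
  rw [hs, he]

-- ===== VERDICT (by name: the statement is the Claim_ definition above) =====
theorem get_word_spans_spec : Claim_equal_get_word_spans := by
  intro text _
  unfold Spec_get_word_spans
  rw [A_eq_spec, B_eq_spec]
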